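-- pv_equiv track=rewrite | github.com/Python-study-f/Algorithm-study_1H | Programmers/1Level/Navigation-mocktest/mang00.py | solution
-- ===== SOURCE A (Python) =====
-- def solution(answers):
--     answer = []
--     count = [0, 0, 0]  # 맞춘 개수
--     a = [1, 2, 3, 4, 5]
--     b = [2, 1, 2, 3, 2, 4, 2, 5]
--     c = [3, 3, 1, 1, 2, 2, 4, 4, 5, 5]
--     for i in range(len(answers)):
--         if a[i % len(a)] == answers[i]:  # answers 길이 % a,b,c 길이
--             count[0] += 1
--         if b[i % len(b)] == answers[i]:
--             count[1] += 1
--         if c[i % len(c)] == answers[i]: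
--             count[2] += 1
--     tuple_count = [(1, count[0]), (2, count[1]), (3, count[2])]
--     tuple_count.sort(key=lambda x: x[1], reverse=True)  # 내림차순 - 높은 점수가 젤 첫번째 값으로 올 수 있게 함
--     answer.append(tuple_count[0][0])
--     for i in range(1, len(tuple_count)):  # 동점자가 있을 때
--         if tuple_count[i][1] != tuple_count[i - 1][1]:  # 동점이 아닐 때
--             break
--         answer.append(tuple_count[i][0])  # 동점일 경우 추가된다
--     answer.sort()  # 여럿일 경우, 오름차순 정렬
--     return answer
-- ===== SOURCE B (Python) =====
-- def solution(answers):
--     # Index the answers once by (position mod 40, value) -- 40 = lcm of the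
--     # three pattern lengths -- then score each pattern with 40 dictionary
--     # lookups instead of comparing it against every answer.
--     freq = {}
--     for i, x in enumerate(answers):
--         key = (i % 40, x)
--         freq[key] = freq.get(key, 0) + 1
--     patterns = [[1, 2, 3, 4, 5],
--                 [2, 1, 2, 3, 2, 4, 2, 5],
--                 [3, 3, 1, 1, 2, 2, 4, 4, 5, 5]]
--     counts = [sum(freq.get((r, p[r % len(p)]), 0) for r in range(40))
--               for p in patterns]
--     best = max(counts)
--     return [i + 1 for i, c in enumerate(counts) if c == best]
-- ===== Notes on version B (the rewrite author's own statement) =====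
-- stated objective: alternative
-- what changed: B builds a dictionary keyed by (index mod 40, value) in one pass over the answers (40 = lcm of the three pattern lengths) and scores each pattern by 40 dictionary lookups, then returns the argmax set by max-then-filter; A instead compares every answer against all three cyclic patterns element by element and finishes with a sort-descending/tie-scan/sort-ascending block.
import Mathlib
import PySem

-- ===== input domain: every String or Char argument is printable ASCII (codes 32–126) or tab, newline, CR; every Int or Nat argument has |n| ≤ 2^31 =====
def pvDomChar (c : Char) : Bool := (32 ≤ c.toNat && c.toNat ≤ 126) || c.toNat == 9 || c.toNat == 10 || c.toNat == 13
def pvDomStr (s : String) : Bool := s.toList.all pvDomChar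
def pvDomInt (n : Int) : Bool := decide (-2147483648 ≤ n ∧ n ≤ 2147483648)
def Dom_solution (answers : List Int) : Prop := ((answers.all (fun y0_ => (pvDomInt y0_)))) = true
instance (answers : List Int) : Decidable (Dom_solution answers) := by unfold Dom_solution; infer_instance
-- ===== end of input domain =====

-- B indexes the answers once by (index mod 40, value) and scores each pattern by 40
-- dictionary lookups, then returns the argmax set by max-then-filter (objective:
-- alternative); same return value everywhere.

-- ===== PORT A =====
-- indices i, i % len(pattern) are always in range, so pyGetD with default 0 is exact
def solution (answers : List Int) : List Int :=
  let a : List Int := [1, 2, 3, 4, 5]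
  let b : List Int := [2, 1, 2, 3, 2, 4, 2, 5]
  let c : List Int := [3, 3, 1, 1, 2, 2, 4, 4, 5, 5]
  let count : Int × Int × Int :=
    (PySem.List.pyRange 0 (PySem.List.len answers) 1).foldl (fun cnt i =>
      let cnt := if PySem.List.pyGetD a (PySem.Int.mod i (PySem.List.len a)) 0 == PySem.List.pyGetD answers i 0
                 then (cnt.1 + 1, cnt.2.1, cnt.2.2) else cnt
      let cnt := if PySem.List.pyGetD b (PySem.Int.mod i (PySem.List.len b)) 0 == PySem.List.pyGetD answers i 0
                 then (cnt.1, cnt.2.1 + 1, cnt.2.2) else cnt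
      let cnt := if PySem.List.pyGetD c (PySem.Int.mod i (PySem.List.len c)) 0 == PySem.List.pyGetD answers i 0
                 then (cnt.1, cnt.2.1, cnt.2.2 + 1) else cnt
      cnt) (0, 0, 0)
  let tupleCount : List (Int × Int) :=
    PySem.List.sorted [(1, count.1), (2, count.2.1), (3, count.2.2)] (fun x => x.2) true
  let answer : List Int := [(PySem.List.pyGetD tupleCount 0 (0, 0)).1]
  -- the tie loop 'for i in range(1, len(tuple_count))' with break, unrolled for the
  -- fixed length-3 list (hand port of the break; exact)
  let answer :=
    if (PySem.List.pyGetD tupleCount 1 (0, 0)).2 != (PySem.List.pyGetD tupleCount 0 (0, 0)).2 then answer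
    else
      let answer := answer ++ [(PySem.List.pyGetD tupleCount 1 (0, 0)).1]
      if (PySem.List.pyGetD tupleCount 2 (0, 0)).2 != (PySem.List.pyGetD tupleCount 1 (0, 0)).2 then answer
      else answer ++ [(PySem.List.pyGetD tupleCount 2 (0, 0)).1]
  PySem.List.sorted answer (fun x => x) false

-- ===== PORT B =====
-- 'freq[key] = freq.get(key, 0) + 1' is Dict.insert key (getD key 0 + 1); exact
def solution_alt (answers : List Int) : List Int :=
  let freq : PySem.Dict (Int × Int) Int :=
    (PySem.List.enumerate answers 0).foldl
      (fun d p => d.insert (PySem.Int.mod p.1 40, p.2) (d.getD (PySem.Int.mod p.1 40, p.2) 0 + 1))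
      PySem.Dict.empty
  let patterns : List (List Int) :=
    [[1, 2, 3, 4, 5], [2, 1, 2, 3, 2, 4, 2, 5], [3, 3, 1, 1, 2, 2, 4, 4, 5, 5]]
  let counts : List Int := patterns.map (fun p =>
    ((PySem.List.pyRange 0 40 1).map (fun r =>
      freq.getD (r, PySem.List.pyGetD p (PySem.Int.mod r (PySem.List.len p)) 0) 0)).sum)
  let best : Int := (PySem.List.max? counts (fun x => x)).getD 0
  ((PySem.List.enumerate counts 0).filter (fun p => p.2 == best)).map (fun p => p.1 + 1)

-- ===== PRECONDITION & SPEC =====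
def Spec_solution (answers : List Int) (out : List Int) : Prop := out = solution_alt answers
instance (answers : List Int) (out : List Int) : Decidable (Spec_solution answers out) := by unfold Spec_solution; infer_instance

-- ===== CLAIM (what is proved, stated in full; the proofs are below) =====
def Claim_equal_solution : Prop := ∀ (answers : List Int), Dom_solution answers → Spec_solution answers (solution answers)

-- ===== LEMMAS AND PROOFS =====

-- the triple-counter fold splits into three independent folds
theorem foldl_triple_split (L : List Int) (p q r : Int → Bool) (x y z : Int) :
    L.foldl (fun (cnt : Int × Int × Int) i =>
      let cnt := if p i then (cnt.1 + 1, cnt.2.1, cnt.2.2) else cnt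
      let cnt := if q i then (cnt.1, cnt.2.1 + 1, cnt.2.2) else cnt
      let cnt := if r i then (cnt.1, cnt.2.1, cnt.2.2 + 1) else cnt
      cnt) (x, y, z)
    = (L.foldl (fun acc i => if p i then acc + 1 else acc) x,
       L.foldl (fun acc i => if q i then acc + 1 else acc) y,
       L.foldl (fun acc i => if r i then acc + 1 else acc) z) := by
  induction L generalizing x y z with
  | nil => rfl
  | cons h t ih =>
      simp only [List.foldl_cons]
      rw [← ih]
      by_cases hp : p h <;> by_cases hq : q h <;> by_cases hr : r h <;> simp [hp, hq, hr]

-- A's per-pattern count: the index loop equals a countP over enumerate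
theorem a_count_eq (pat answers : List Int) :
    (PySem.List.pyRange 0 (PySem.List.len answers) 1).foldl
        (fun acc i => if PySem.List.pyGetD pat (PySem.Int.mod i (PySem.List.len pat)) 0 == PySem.List.pyGetD answers i 0 then acc + 1 else acc) 0
    = ((PySem.List.enumerate answers 0).countP
        (fun p => PySem.List.pyGetD pat (PySem.Int.mod p.1 (PySem.List.len pat)) 0 == p.2) : Int) := by
  rw [PySem.List.foldl_if_add_one]
  rw [PySem.List.enumerate_eq_map_pyRange (d := 0), List.countP_map]
  simp only [zero_add]
  rfl

-- if x is not among ms, its indicator sum over ms vanishes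
theorem sum_indicator_zero (x : Int × Int) (ms : List (Int × Int)) (h : x ∉ ms) :
    (ms.map (fun m => if x == m then (1 : Int) else 0)).sum = 0 := by
  induction ms with
  | nil => simp
  | cons m ms ih =>
      have hx : ¬ (x = m) := by intro he; exact h (he ▸ List.mem_cons_self)
      have h2 := ih (fun hm => h (List.mem_cons_of_mem _ hm))
      have h2' : (List.map (fun m => if x = m then (1:Int) else 0) ms).sum = 0 := by
        simpa using h2
      simp [hx, h2']

-- on a duplicate-free target list the indicator sum is the membership indicator
theorem sum_indicator (x : Int × Int) (ms : List (Int × Int)) (h : ms.Nodup) :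
    (ms.map (fun m => if x == m then (1 : Int) else 0)).sum = if x ∈ ms then 1 else 0 := by
  induction ms with
  | nil => simp
  | cons m ms ih =>
      rcases List.nodup_cons.mp h with ⟨hm, hms⟩
      by_cases hx : x = m
      · subst hx
        simp only [List.map_cons, List.sum_cons, beq_self_eq_true, if_pos rfl,
          sum_indicator_zero x ms hm]
        simp
      · simp only [List.map_cons, List.sum_cons, beq_iff_eq, if_neg hx, ih hms]
        have : (x ∈ m :: ms) ↔ x ∈ ms := by
          constructor
          · intro hmem; rcases List.mem_cons.mp hmem with h1 | h1
            · exact absurd h1 hx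
            · exact h1
          · exact List.mem_cons_of_mem _
        split_ifs with h1 h2 h2 <;> simp_all
-- splitting a sum of pointwise sums
theorem sum_map_add_split (ms : List (Int × Int)) (f g : Int × Int → Int) :
    (ms.map (fun m => f m + g m)).sum = (ms.map f).sum + (ms.map g).sum := by
  induction ms with
  | nil => simp
  | cons m ms ih => simp [ih]; ring

-- summing counts of distinct targets = counting elements hitting any target
theorem sum_count_eq_countP (l ms : List (Int × Int)) (h : ms.Nodup) :
    (ms.map (fun m => (l.count m : Int))).sum = (l.countP (fun x => decide (x ∈ ms)) : Int) := by
  induction l with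
  | nil => simp
  | cons x l ih =>
      have hc : ∀ m : Int × Int, ((x :: l).count m : Int)
          = (l.count m : Int) + (if x == m then 1 else 0) := by
        intro m
        by_cases hx : x = m
        · subst hx; simp [List.count_cons]
        · simp [List.count_cons, hx]
      calc (ms.map (fun m => ((x :: l).count m : Int))).sum
          = (ms.map (fun m => (l.count m : Int) + (if x == m then 1 else 0))).sum := by
            simp only [hc]
        _ = (ms.map (fun m => (l.count m : Int))).sum
              + (ms.map (fun m => if x == m then (1 : Int) else 0)).sum := by
            exact sum_map_add_split ms _ _
        _ = (l.countP (fun x => decide (x ∈ ms)) : Int) + (if x ∈ ms then 1 else 0) := by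
            rw [ih, sum_indicator x ms h]
        _ = ((x :: l).countP (fun x => decide (x ∈ ms)) : Int) := by
            rw [List.countP_cons]
            by_cases hx : x ∈ ms <;> simp [hx]


-- membership of a reduced key in the 40-entry target list, for 0 <= i
theorem mem_targets_iff (pat : List Int) (hL : 0 < PySem.List.len pat)
    (hdvd : PySem.List.len pat ∣ 40) (i x : Int) (hi : 0 ≤ i) :
    ((PySem.Int.mod i 40, x) ∈ (PySem.List.pyRange 0 40 1).map
        (fun r => (r, PySem.List.pyGetD pat (PySem.Int.mod r (PySem.List.len pat)) 0)))
    ↔ PySem.List.pyGetD pat (PySem.Int.mod i (PySem.List.len pat)) 0 = x := by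
  have h40 : PySem.Int.mod i 40 = i % 40 := PySem.Int.mod_eq_emod_of_pos (by norm_num)
  have hmm : PySem.Int.mod (i % 40) (PySem.List.len pat) = PySem.Int.mod i (PySem.List.len pat) := by
    rw [PySem.Int.mod_eq_emod_of_pos hL, PySem.Int.mod_eq_emod_of_pos hL]
    exact Int.emod_emod_of_dvd i hdvd
  rw [h40]
  constructor
  · intro hmem
    rcases List.mem_map.mp hmem with ⟨r, _, heq⟩
    have hr1 : r = i % 40 := congrArg Prod.fst heq
    have hx1 : PySem.List.pyGetD pat (PySem.Int.mod r (PySem.List.len pat)) 0 = x := congrArg Prod.snd heq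
    rw [hr1, hmm] at hx1
    exact hx1
  · intro hx
    refine List.mem_map.mpr ⟨i % 40, ?_, ?_⟩
    · exact PySem.List.mem_pyRange_one.mpr ⟨Int.emod_nonneg i (by norm_num), Int.emod_lt_of_pos i (by norm_num)⟩
    · rw [hmm, hx]

-- B's per-pattern 40-lookup sum equals A's per-pattern countP, for L | 40, 0 < L
theorem b_count_eq (pat answers : List Int)
    (hL : 0 < (PySem.List.len pat)) (hdvd : PySem.List.len pat ∣ 40) :
    ((PySem.List.pyRange 0 40 1).map (fun r =>
        ((PySem.List.enumerate answers 0).foldl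
          (fun d p => d.insert (PySem.Int.mod p.1 40, p.2) (d.getD (PySem.Int.mod p.1 40, p.2) 0 + 1))
          PySem.Dict.empty).getD (r, PySem.List.pyGetD pat (PySem.Int.mod r (PySem.List.len pat)) 0) 0)).sum
    = ((PySem.List.enumerate answers 0).countP
        (fun p => PySem.List.pyGetD pat (PySem.Int.mod p.1 (PySem.List.len pat)) 0 == p.2) : Int) := by
  have hfold : ∀ m : Int × Int,
      ((PySem.List.enumerate answers 0).foldl
        (fun d p => d.insert (PySem.Int.mod p.1 40, p.2) (d.getD (PySem.Int.mod p.1 40, p.2) 0 + 1))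
        PySem.Dict.empty).getD m 0
      = ((((PySem.List.enumerate answers 0).map (fun p => (PySem.Int.mod p.1 40, p.2))).count m : Int)) := by
    intro m
    have hmapped :
        (List.map (fun p : Int × Int => (PySem.Int.mod p.1 40, p.2)) (PySem.List.enumerate answers 0)).foldl
          (fun (d : PySem.Dict (Int × Int) Int) x => d.insert x (d.getD x 0 + 1)) PySem.Dict.empty
        = (PySem.List.enumerate answers 0).foldl
            (fun d p => d.insert (PySem.Int.mod p.1 40, p.2) (d.getD (PySem.Int.mod p.1 40, p.2) 0 + 1))
            PySem.Dict.empty := List.foldl_map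
    rw [← hmapped, PySem.Dict.getD_foldl_insert_add_one]
    simp
  have hms_nodup : ((PySem.List.pyRange 0 40 1).map
      (fun r => (r, PySem.List.pyGetD pat (PySem.Int.mod r (PySem.List.len pat)) 0))).Nodup := by
    apply List.Nodup.of_map Prod.fst
    have hfst : ((PySem.List.pyRange 0 40 1).map
        (fun r => (r, PySem.List.pyGetD pat (PySem.Int.mod r (PySem.List.len pat)) 0))).map Prod.fst
        = PySem.List.pyRange 0 40 1 := by
      rw [List.map_map]
      have hid : (Prod.fst ∘ fun r : Int => (r, PySem.List.pyGetD pat (PySem.Int.mod r (PySem.List.len pat)) 0)) = id := rfl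
      rw [hid, List.map_id]
    rw [hfst]
    exact PySem.List.nodup_pyRange_one 0 40
  calc ((PySem.List.pyRange 0 40 1).map (fun r =>
        ((PySem.List.enumerate answers 0).foldl
          (fun d p => d.insert (PySem.Int.mod p.1 40, p.2) (d.getD (PySem.Int.mod p.1 40, p.2) 0 + 1))
          PySem.Dict.empty).getD (r, PySem.List.pyGetD pat (PySem.Int.mod r (PySem.List.len pat)) 0) 0)).sum
      = ((PySem.List.pyRange 0 40 1).map (fun r =>
          ((((PySem.List.enumerate answers 0).map (fun p => (PySem.Int.mod p.1 40, p.2))).count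
            (r, PySem.List.pyGetD pat (PySem.Int.mod r (PySem.List.len pat)) 0) : Int)))).sum := by
        simp only [hfold]
    _ = (((PySem.List.pyRange 0 40 1).map
          (fun r => (r, PySem.List.pyGetD pat (PySem.Int.mod r (PySem.List.len pat)) 0))).map
          (fun m => ((((PySem.List.enumerate answers 0).map (fun p => (PySem.Int.mod p.1 40, p.2))).count m : Int)))).sum := by
        rw [List.map_map]
        rfl
    _ = (((PySem.List.enumerate answers 0).map (fun p => (PySem.Int.mod p.1 40, p.2))).countP
          (fun x => decide (x ∈ (PySem.List.pyRange 0 40 1).map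
            (fun r => (r, PySem.List.pyGetD pat (PySem.Int.mod r (PySem.List.len pat)) 0)))) : Int) := by
        exact sum_count_eq_countP _ _ hms_nodup
    _ = ((PySem.List.enumerate answers 0).countP
          (fun p => PySem.List.pyGetD pat (PySem.Int.mod p.1 (PySem.List.len pat)) 0 == p.2) : Int) := by
        rw [List.countP_map]
        congr 1
        apply List.countP_congr
        intro q hq
        rcases (PySem.List.mem_enumerate_iff answers 0 q).mp hq with ⟨k, hk, hq'⟩
        have hq1 : 0 ≤ q.1 := by rw [hq']; simp
        simp only [Function.comp, decide_eq_true_iff, beq_iff_eq]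
        exact mem_targets_iff pat hL hdvd q.1 q.2 hq1

-- the finishing step: sort-desc / tie-scan / sort-asc equals max-then-filter
theorem finish_eq (c0 c1 c2 : Int) :
    (let tupleCount : List (Int × Int) :=
        PySem.List.sorted [(1, c0), (2, c1), (3, c2)] (fun x => x.2) true
      let answer : List Int := [(PySem.List.pyGetD tupleCount 0 (0, 0)).1]
      let answer :=
        if (PySem.List.pyGetD tupleCount 1 (0, 0)).2 != (PySem.List.pyGetD tupleCount 0 (0, 0)).2 then answer
        else
          let answer := answer ++ [(PySem.List.pyGetD tupleCount 1 (0, 0)).1]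
          if (PySem.List.pyGetD tupleCount 2 (0, 0)).2 != (PySem.List.pyGetD tupleCount 1 (0, 0)).2 then answer
          else answer ++ [(PySem.List.pyGetD tupleCount 2 (0, 0)).1]
      PySem.List.sorted answer (fun x => x) false)
    = (let best : Int := (PySem.List.max? [c0, c1, c2] (fun x => x)).getD 0
       ((PySem.List.enumerate [c0, c1, c2] 0).filter (fun p => p.2 == best)).map (fun p => p.1 + 1)) := by
  rcases lt_trichotomy c0 c1 with h01 | h01 | h01 <;>
    rcases lt_trichotomy c0 c2 with h02 | h02 | h02 <;>
    rcases lt_trichotomy c1 c2 with h12 | h12 | h12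
  · -- case
    have k0 : c0 < c1 := by omega
    have k1 : ¬ (c1 < c0) := by omega
    have k2 : ¬ (c0 = c1) := by omega
    have k3 : ¬ (c1 = c0) := by omega
    have k4 : c0 ≤ c1 := by omega
    have k5 : ¬ (c1 ≤ c0) := by omega
    have k6 : c0 < c2 := by omega
    have k7 : ¬ (c2 < c0) := by omega
    have k8 : ¬ (c0 = c2) := by omega
    have k9 : ¬ (c2 = c0) := by omega
    have k10 : c0 ≤ c2 := by omega
    have k11 : ¬ (c2 ≤ c0) := by omega
    have k12 : c1 < c2 := by omega
    have k13 : ¬ (c2 < c1) := by omega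
    have k14 : ¬ (c1 = c2) := by omega
    have k15 : ¬ (c2 = c1) := by omega
    have k16 : c1 ≤ c2 := by omega
    have k17 : ¬ (c2 ≤ c1) := by omega
    simp [PySem.List.sorted, PySem.List.insertBy, PySem.List.max?, PySem.List.enumerate,
          PySem.List.pyGetD, List.filter_cons, k0, k1, k2, k3, k4, k5, k6, k7, k8, k9, k10, k11, k12, k13, k14, k15, k16, k17]
  · -- case
    have k0 : c0 < c1 := by omega
    have k1 : ¬ (c1 < c0) := by omega
    have k2 : ¬ (c0 = c1) := by omega
    have k3 : ¬ (c1 = c0) := by omega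
    have k4 : c0 ≤ c1 := by omega
    have k5 : ¬ (c1 ≤ c0) := by omega
    have k6 : c0 < c2 := by omega
    have k7 : ¬ (c2 < c0) := by omega
    have k8 : ¬ (c0 = c2) := by omega
    have k9 : ¬ (c2 = c0) := by omega
    have k10 : c0 ≤ c2 := by omega
    have k11 : ¬ (c2 ≤ c0) := by omega
    have k12 : c1 = c2 := by omega
    simp [PySem.List.sorted, PySem.List.insertBy, PySem.List.max?, PySem.List.enumerate,
          PySem.List.pyGetD, List.filter_cons, k0, k1, k2, k3, k4, k5, k6, k7, k8, k9, k10, k11, k12]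
  · -- case
    have k0 : c0 < c1 := by omega
    have k1 : ¬ (c1 < c0) := by omega
    have k2 : ¬ (c0 = c1) := by omega
    have k3 : ¬ (c1 = c0) := by omega
    have k4 : c0 ≤ c1 := by omega
    have k5 : ¬ (c1 ≤ c0) := by omega
    have k6 : c0 < c2 := by omega
    have k7 : ¬ (c2 < c0) := by omega
    have k8 : ¬ (c0 = c2) := by omega
    have k9 : ¬ (c2 = c0) := by omega
    have k10 : c0 ≤ c2 := by omega
    have k11 : ¬ (c2 ≤ c0) := by omega
    have k12 : c2 < c1 := by omega
    have k13 : ¬ (c1 < c2) := by omega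
    have k14 : ¬ (c2 = c1) := by omega
    have k15 : ¬ (c1 = c2) := by omega
    have k16 : c2 ≤ c1 := by omega
    have k17 : ¬ (c1 ≤ c2) := by omega
    simp [PySem.List.sorted, PySem.List.insertBy, PySem.List.max?, PySem.List.enumerate,
          PySem.List.pyGetD, List.filter_cons, k0, k1, k2, k3, k4, k5, k6, k7, k8, k9, k10, k11, k12, k13, k14, k15, k16, k17]
  · omega
  · omega
  · -- case
    have k0 : c0 < c1 := by omega
    have k1 : ¬ (c1 < c0) := by omega
    have k2 : ¬ (c0 = c1) := by omega
    have k3 : ¬ (c1 = c0) := by omega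
    have k4 : c0 ≤ c1 := by omega
    have k5 : ¬ (c1 ≤ c0) := by omega
    have k6 : c0 = c2 := by omega
    have k7 : c2 < c1 := by omega
    have k8 : ¬ (c1 < c2) := by omega
    have k9 : ¬ (c2 = c1) := by omega
    have k10 : ¬ (c1 = c2) := by omega
    have k11 : c2 ≤ c1 := by omega
    have k12 : ¬ (c1 ≤ c2) := by omega
    simp [PySem.List.sorted, PySem.List.insertBy, PySem.List.max?, PySem.List.enumerate,
          PySem.List.pyGetD, List.filter_cons, k0, k1, k2, k3, k4, k5, k6, k7, k8, k9, k10, k11, k12]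
  · omega
  · omega
  · -- case
    have k0 : c0 < c1 := by omega
    have k1 : ¬ (c1 < c0) := by omega
    have k2 : ¬ (c0 = c1) := by omega
    have k3 : ¬ (c1 = c0) := by omega
    have k4 : c0 ≤ c1 := by omega
    have k5 : ¬ (c1 ≤ c0) := by omega
    have k6 : c2 < c0 := by omega
    have k7 : ¬ (c0 < c2) := by omega
    have k8 : ¬ (c2 = c0) := by omega
    have k9 : ¬ (c0 = c2) := by omega
    have k10 : c2 ≤ c0 := by omega
    have k11 : ¬ (c0 ≤ c2) := by omega
    have k12 : c2 < c1 := by omega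
    have k13 : ¬ (c1 < c2) := by omega
    have k14 : ¬ (c2 = c1) := by omega
    have k15 : ¬ (c1 = c2) := by omega
    have k16 : c2 ≤ c1 := by omega
    have k17 : ¬ (c1 ≤ c2) := by omega
    simp [PySem.List.sorted, PySem.List.insertBy, PySem.List.max?, PySem.List.enumerate,
          PySem.List.pyGetD, List.filter_cons, k0, k1, k2, k3, k4, k5, k6, k7, k8, k9, k10, k11, k12, k13, k14, k15, k16, k17]
  · -- case
    have k0 : c0 = c1 := by omega
    have k1 : c0 < c2 := by omega
    have k2 : ¬ (c2 < c0) := by omega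
    have k3 : ¬ (c0 = c2) := by omega
    have k4 : ¬ (c2 = c0) := by omega
    have k5 : c0 ≤ c2 := by omega
    have k6 : ¬ (c2 ≤ c0) := by omega
    have k7 : c1 < c2 := by omega
    have k8 : ¬ (c2 < c1) := by omega
    have k9 : ¬ (c1 = c2) := by omega
    have k10 : ¬ (c2 = c1) := by omega
    have k11 : c1 ≤ c2 := by omega
    have k12 : ¬ (c2 ≤ c1) := by omega
    simp [PySem.List.sorted, PySem.List.insertBy, PySem.List.max?, PySem.List.enumerate,
          PySem.List.pyGetD, List.filter_cons, k0, k1, k2, k3, k4, k5, k6, k7, k8, k9, k10, k11, k12]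
  · omega
  · omega
  · omega
  · -- case
    have k0 : c0 = c1 := by omega
    have k1 : c0 = c2 := by omega
    have k2 : c1 = c2 := by omega
    simp [PySem.List.sorted, PySem.List.insertBy, PySem.List.max?, PySem.List.enumerate,
          PySem.List.pyGetD, List.filter_cons, k0, k1, k2]
  · omega
  · omega
  · omega
  · -- case
    have k0 : c0 = c1 := by omega
    have k1 : c2 < c0 := by omega
    have k2 : ¬ (c0 < c2) := by omega
    have k3 : ¬ (c2 = c0) := by omega
    have k4 : ¬ (c0 = c2) := by omega
    have k5 : c2 ≤ c0 := by omega
    have k6 : ¬ (c0 ≤ c2) := by omega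
    have k7 : c2 < c1 := by omega
    have k8 : ¬ (c1 < c2) := by omega
    have k9 : ¬ (c2 = c1) := by omega
    have k10 : ¬ (c1 = c2) := by omega
    have k11 : c2 ≤ c1 := by omega
    have k12 : ¬ (c1 ≤ c2) := by omega
    simp [PySem.List.sorted, PySem.List.insertBy, PySem.List.max?, PySem.List.enumerate,
          PySem.List.pyGetD, List.filter_cons, k0, k1, k2, k3, k4, k5, k6, k7, k8, k9, k10, k11, k12]
  · -- case
    have k0 : c1 < c0 := by omega
    have k1 : ¬ (c0 < c1) := by omega
    have k2 : ¬ (c1 = c0) := by omega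
    have k3 : ¬ (c0 = c1) := by omega
    have k4 : c1 ≤ c0 := by omega
    have k5 : ¬ (c0 ≤ c1) := by omega
    have k6 : c0 < c2 := by omega
    have k7 : ¬ (c2 < c0) := by omega
    have k8 : ¬ (c0 = c2) := by omega
    have k9 : ¬ (c2 = c0) := by omega
    have k10 : c0 ≤ c2 := by omega
    have k11 : ¬ (c2 ≤ c0) := by omega
    have k12 : c1 < c2 := by omega
    have k13 : ¬ (c2 < c1) := by omega
    have k14 : ¬ (c1 = c2) := by omega
    have k15 : ¬ (c2 = c1) := by omega
    have k16 : c1 ≤ c2 := by omega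
    have k17 : ¬ (c2 ≤ c1) := by omega
    simp [PySem.List.sorted, PySem.List.insertBy, PySem.List.max?, PySem.List.enumerate,
          PySem.List.pyGetD, List.filter_cons, k0, k1, k2, k3, k4, k5, k6, k7, k8, k9, k10, k11, k12, k13, k14, k15, k16, k17]
  · omega
  · omega
  · -- case
    have k0 : c1 < c0 := by omega
    have k1 : ¬ (c0 < c1) := by omega
    have k2 : ¬ (c1 = c0) := by omega
    have k3 : ¬ (c0 = c1) := by omega
    have k4 : c1 ≤ c0 := by omega
    have k5 : ¬ (c0 ≤ c1) := by omega
    have k6 : c0 = c2 := by omega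
    have k7 : c1 < c2 := by omega
    have k8 : ¬ (c2 < c1) := by omega
    have k9 : ¬ (c1 = c2) := by omega
    have k10 : ¬ (c2 = c1) := by omega
    have k11 : c1 ≤ c2 := by omega
    have k12 : ¬ (c2 ≤ c1) := by omega
    simp [PySem.List.sorted, PySem.List.insertBy, PySem.List.max?, PySem.List.enumerate,
          PySem.List.pyGetD, List.filter_cons, k0, k1, k2, k3, k4, k5, k6, k7, k8, k9, k10, k11, k12]
  · omega
  · omega
  · -- case
    have k0 : c1 < c0 := by omega
    have k1 : ¬ (c0 < c1) := by omega
    have k2 : ¬ (c1 = c0) := by omega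
    have k3 : ¬ (c0 = c1) := by omega
    have k4 : c1 ≤ c0 := by omega
    have k5 : ¬ (c0 ≤ c1) := by omega
    have k6 : c2 < c0 := by omega
    have k7 : ¬ (c0 < c2) := by omega
    have k8 : ¬ (c2 = c0) := by omega
    have k9 : ¬ (c0 = c2) := by omega
    have k10 : c2 ≤ c0 := by omega
    have k11 : ¬ (c0 ≤ c2) := by omega
    have k12 : c1 < c2 := by omega
    have k13 : ¬ (c2 < c1) := by omega
    have k14 : ¬ (c1 = c2) := by omega
    have k15 : ¬ (c2 = c1) := by omega
    have k16 : c1 ≤ c2 := by omega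
    have k17 : ¬ (c2 ≤ c1) := by omega
    simp [PySem.List.sorted, PySem.List.insertBy, PySem.List.max?, PySem.List.enumerate,
          PySem.List.pyGetD, List.filter_cons, k0, k1, k2, k3, k4, k5, k6, k7, k8, k9, k10, k11, k12, k13, k14, k15, k16, k17]
  · -- case
    have k0 : c1 < c0 := by omega
    have k1 : ¬ (c0 < c1) := by omega
    have k2 : ¬ (c1 = c0) := by omega
    have k3 : ¬ (c0 = c1) := by omega
    have k4 : c1 ≤ c0 := by omega
    have k5 : ¬ (c0 ≤ c1) := by omega
    have k6 : c2 < c0 := by omega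
    have k7 : ¬ (c0 < c2) := by omega
    have k8 : ¬ (c2 = c0) := by omega
    have k9 : ¬ (c0 = c2) := by omega
    have k10 : c2 ≤ c0 := by omega
    have k11 : ¬ (c0 ≤ c2) := by omega
    have k12 : c1 = c2 := by omega
    simp [PySem.List.sorted, PySem.List.insertBy, PySem.List.max?, PySem.List.enumerate,
          PySem.List.pyGetD, List.filter_cons, k0, k1, k2, k3, k4, k5, k6, k7, k8, k9, k10, k11, k12]
  · -- case
    have k0 : c1 < c0 := by omega
    have k1 : ¬ (c0 < c1) := by omega
    have k2 : ¬ (c1 = c0) := by omega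
    have k3 : ¬ (c0 = c1) := by omega
    have k4 : c1 ≤ c0 := by omega
    have k5 : ¬ (c0 ≤ c1) := by omega
    have k6 : c2 < c0 := by omega
    have k7 : ¬ (c0 < c2) := by omega
    have k8 : ¬ (c2 = c0) := by omega
    have k9 : ¬ (c0 = c2) := by omega
    have k10 : c2 ≤ c0 := by omega
    have k11 : ¬ (c0 ≤ c2) := by omega
    have k12 : c2 < c1 := by omega
    have k13 : ¬ (c1 < c2) := by omega
    have k14 : ¬ (c2 = c1) := by omega
    have k15 : ¬ (c1 = c2) := by omega
    have k16 : c2 ≤ c1 := by omega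
    have k17 : ¬ (c1 ≤ c2) := by omega
    simp [PySem.List.sorted, PySem.List.insertBy, PySem.List.max?, PySem.List.enumerate,
          PySem.List.pyGetD, List.filter_cons, k0, k1, k2, k3, k4, k5, k6, k7, k8, k9, k10, k11, k12, k13, k14, k15, k16, k17]

-- ===== VERDICT (by name: the statement is the Claim_ definition above) =====
theorem solution_spec : Claim_equal_solution := by
  intro answers _
  unfold Spec_solution solution solution_alt
  simp only [List.map_cons, List.map_nil]
  rw [foldl_triple_split]
  rw [a_count_eq, a_count_eq, a_count_eq]
  rw [b_count_eq _ _ (by decide) (by decide),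
      b_count_eq _ _ (by decide) (by decide),
      b_count_eq _ _ (by decide) (by decide)]
  exact finish_eq _ _ _
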